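-- pv_equiv track=rewrite | github.com/healthysustainablecities/ghsci-policy | amplify/functions/process-policy-report/ghsci.py | get_policy_checklist_item
-- ===== SOURCE A (Python) =====
-- def get_policy_checklist_item(
--     policy_review_setting,
--     phrases,
--     item='Levels of government',
-- ):
--     """Get policy checklist items (e.g. 'Levels of government' or 'Environmnetal disaster context')."""
--     if policy_review_setting is None:
--         return []
--     levels = policy_review_setting[item].split('\n')
--     if len(levels) == 0:
--         return []
--     elif len(levels) == 1:
--         return levels
--     elif len(levels) > 1:
--         levels_clean = [
--             phrases[level[0].strip()].strip()
--             for level in [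
--                 x.split(': ')
--                 for x in levels
--                 if not (
--                     x.startswith('Other') or x.startswith('(Please indicate')
--                 )
--             ]
--             if str(level[1]).strip()
--             not in ['No', 'missing', 'nan', 'None', 'N/A', '']
--         ]
--         levels_clean = levels_clean + [
--             x.replace('Other: ', '').lower()
--             for x in levels
--             if x.startswith('Other: ')
--         ]
--         return levels_clean
-- ===== SOURCE B (Python) =====
-- def get_policy_checklist_item(
--     policy_review_setting,
--     phrases,
--     item='Levels of government',
-- ):
--     """Single-pass rewrite: one loop over the lines keeping two accumulators."""
--     if policy_review_setting is None:
--         return []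
--     levels = policy_review_setting[item].split('\n')
--     if len(levels) == 1:
--         return levels
--     clean, others = [], []
--     for line in levels:
--         if line.startswith('Other: '):
--             others.append(line.replace('Other: ', '').lower())
--         elif line.startswith('Other') or line.startswith('(Please indicate'):
--             continue
--         else:
--             parts = line.split(': ')
--             if parts[1].strip() not in ('No', 'missing', 'nan', 'None', 'N/A', ''):
--                 clean.append(phrases[parts[0].strip()].strip())
--     return clean + others
-- ===== Notes on version B (the rewrite author's own statement) =====
-- stated objective: simpler
-- what changed: Replaced A's two nested comprehensions plus a second pass over the lines with a single loop that classifies each line once into two accumulator lists (clean and others) and returns clean + others.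
import Mathlib
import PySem

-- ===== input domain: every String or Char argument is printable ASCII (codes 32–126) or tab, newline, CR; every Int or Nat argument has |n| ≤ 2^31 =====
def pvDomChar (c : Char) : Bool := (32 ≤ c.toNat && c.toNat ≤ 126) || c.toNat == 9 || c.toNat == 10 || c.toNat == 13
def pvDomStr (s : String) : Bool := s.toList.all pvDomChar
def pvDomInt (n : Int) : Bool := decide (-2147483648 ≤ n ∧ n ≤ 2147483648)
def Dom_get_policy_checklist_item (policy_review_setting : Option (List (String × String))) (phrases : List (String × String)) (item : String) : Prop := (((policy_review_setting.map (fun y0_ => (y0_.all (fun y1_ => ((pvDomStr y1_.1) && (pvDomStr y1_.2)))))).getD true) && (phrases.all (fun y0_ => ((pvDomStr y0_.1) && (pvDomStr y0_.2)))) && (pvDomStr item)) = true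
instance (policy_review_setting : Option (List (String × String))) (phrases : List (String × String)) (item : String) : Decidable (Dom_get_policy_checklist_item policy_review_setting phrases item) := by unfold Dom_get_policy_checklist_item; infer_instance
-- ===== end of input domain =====

-- B replaces A's two nested comprehensions plus a second pass with one loop keeping two accumulator lists (simpler); A=B proved on Pre_ (inputs where A raises no KeyError/IndexError).


-- the negative tokens ['No', 'missing', 'nan', 'None', 'N/A', ''] (shared literal constant)
def pvNegatives : List String := ["No", "missing", "nan", "None", "N/A", ""]

-- ===== PORT A =====
-- literal transliteration of A; .getD "" stands where Python would raise (KeyError/IndexError), those inputs are excluded by Pre_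
def get_policy_checklist_item (policy_review_setting : Option (List (String × String))) (phrases : List (String × String)) (item : String) : List String :=
  match policy_review_setting with
  | none => []
  | some d =>
    let levels := (PySem.Str.split? ((d.lookup item).getD "") "\n").getD []
    if levels.length = 0 then []
    else if levels.length = 1 then levels
    else
      let levels_clean :=
        (((levels.filter (fun x => !(PySem.Str.startswith x "Other" || PySem.Str.startswith x "(Please indicate"))).map
            (fun x => (PySem.Str.split? x ": ").getD [])).filter
            (fun level => !(pvNegatives.contains (PySem.Str.strip ((PySem.List.pyGet? level 1).getD ""))))).map
          (fun level => PySem.Str.strip ((phrases.lookup (PySem.Str.strip ((PySem.List.pyGet? level 0).getD ""))).getD ""))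
      let levels_clean := levels_clean ++
        ((levels.filter (fun x => PySem.Str.startswith x "Other: ")).map
          (fun x => PySem.Str.lower (PySem.Str.replace x "Other: " "")))
      levels_clean

-- ===== PORT B =====
-- literal transliteration of Source B: one fold over the lines with a pair of accumulators
def get_policy_checklist_item_alt (policy_review_setting : Option (List (String × String))) (phrases : List (String × String)) (item : String) : List String :=
  match policy_review_setting with
  | none => []
  | some d =>
    let levels := (PySem.Str.split? ((d.lookup item).getD "") "\n").getD []
    if levels.length = 1 then levels
    else
      let co := levels.foldl (fun (acc : List String × List String) line =>
        if PySem.Str.startswith line "Other: " then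
          (acc.1, acc.2 ++ [PySem.Str.lower (PySem.Str.replace line "Other: " "")])
        else if PySem.Str.startswith line "Other" || PySem.Str.startswith line "(Please indicate" then acc
        else
          let parts := (PySem.Str.split? line ": ").getD []
          if pvNegatives.contains (PySem.Str.strip ((PySem.List.pyGet? parts 1).getD "")) then acc
          else (acc.1 ++ [PySem.Str.strip ((phrases.lookup (PySem.Str.strip ((PySem.List.pyGet? parts 0).getD ""))).getD "")], acc.2))
        ([], [])
      co.1 ++ co.2

-- ===== PRECONDITION & SPEC =====
-- Pre_ excludes exactly the inputs where Python A raises: a missing item key (KeyError), and — when there is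
-- more than one line — a non-'Other'/'(Please indicate' line without ': ' (IndexError) or whose left part,
-- stripped, is missing from phrases while the right part is not a negative token (KeyError).
def pvPreB (policy_review_setting : Option (List (String × String))) (phrases : List (String × String)) (item : String) : Bool :=
  match policy_review_setting with
  | none => true
  | some d =>
    match d.lookup item with
    | none => false
    | some s =>
      let levels := (PySem.Str.split? s "\n").getD []
      decide (levels.length ≤ 1) ||
      levels.all (fun x =>
        (PySem.Str.startswith x "Other" || PySem.Str.startswith x "(Please indicate") ||
        (decide (2 ≤ ((PySem.Str.split? x ": ").getD []).length) &&
         (pvNegatives.contains (PySem.Str.strip ((PySem.List.pyGet? ((PySem.Str.split? x ": ").getD []) 1).getD "")) ||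
          (phrases.lookup (PySem.Str.strip ((PySem.List.pyGet? ((PySem.Str.split? x ": ").getD []) 0).getD ""))).isSome)))

def Pre_get_policy_checklist_item (policy_review_setting : Option (List (String × String))) (phrases : List (String × String)) (item : String) : Prop :=
  pvPreB policy_review_setting phrases item = true
instance (policy_review_setting : Option (List (String × String))) (phrases : List (String × String)) (item : String) : Decidable (Pre_get_policy_checklist_item policy_review_setting phrases item) := by unfold Pre_get_policy_checklist_item; infer_instance

def pvWitness_get_policy_checklist_item : (Option (List (String × String))) × (List (String × String)) × String :=
  (some [("Levels of government", "a: Yes\nb: No\nOther: Foo")], [("a", " Alpha "), ("b", "Beta")], "Levels of government")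

def Spec_get_policy_checklist_item (policy_review_setting : Option (List (String × String))) (phrases : List (String × String)) (item : String) (out : List String) : Prop := out = get_policy_checklist_item_alt policy_review_setting phrases item
instance (policy_review_setting : Option (List (String × String))) (phrases : List (String × String)) (item : String) (out : List String) : Decidable (Spec_get_policy_checklist_item policy_review_setting phrases item out) := by unfold Spec_get_policy_checklist_item; infer_instance

-- ===== CLAIM (what is proved, stated in full; the proofs are below) =====
def Claim_equal_get_policy_checklist_item : Prop := ∀ (policy_review_setting : Option (List (String × String))) (phrases : List (String × String)) (item : String), Dom_get_policy_checklist_item policy_review_setting phrases item → Pre_get_policy_checklist_item policy_review_setting phrases item → Spec_get_policy_checklist_item policy_review_setting phrases item (get_policy_checklist_item policy_review_setting phrases item)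

-- ===== LEMMAS AND PROOFS =====

-- a line starting with 'Other: ' also starts with 'Other'
lemma pv_other_colon_imp (x : String) (h : PySem.Str.startswith x "Other: " = true) :
    PySem.Str.startswith x "Other" = true := by
  simp only [PySem.Str.startswith_eq] at h ⊢
  rw [PySem.Chars.startswith_iff] at h ⊢
  exact List.IsPrefix.trans (by decide) h

-- the invariant of B's fold: it accumulates exactly A's clean list and A's others list
lemma pv_fold_spec (phrases : List (String × String)) :
    ∀ (ls : List String) (c o : List String),
      ls.foldl (fun (acc : List String × List String) line =>
        if PySem.Str.startswith line "Other: " then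
          (acc.1, acc.2 ++ [PySem.Str.lower (PySem.Str.replace line "Other: " "")])
        else if PySem.Str.startswith line "Other" || PySem.Str.startswith line "(Please indicate" then acc
        else
          let parts := (PySem.Str.split? line ": ").getD []
          if pvNegatives.contains (PySem.Str.strip ((PySem.List.pyGet? parts 1).getD "")) then acc
          else (acc.1 ++ [PySem.Str.strip ((phrases.lookup (PySem.Str.strip ((PySem.List.pyGet? parts 0).getD ""))).getD "")], acc.2)) (c, o)
      = (c ++ (((ls.filter (fun x => !(PySem.Str.startswith x "Other" || PySem.Str.startswith x "(Please indicate"))).map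
            (fun x => (PySem.Str.split? x ": ").getD [])).filter
            (fun level => !(pvNegatives.contains (PySem.Str.strip ((PySem.List.pyGet? level 1).getD ""))))).map
          (fun level => PySem.Str.strip ((phrases.lookup (PySem.Str.strip ((PySem.List.pyGet? level 0).getD ""))).getD "")),
         o ++ (ls.filter (fun x => PySem.Str.startswith x "Other: ")).map
          (fun x => PySem.Str.lower (PySem.Str.replace x "Other: " ""))) := by
  intro ls
  induction ls with
  | nil => intro c o; simp
  | cons x xs ih =>
    intro c o
    simp only [List.foldl_cons]
    simp at ih
    by_cases h1 : PySem.Str.startswith x "Other: " = true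
    · have h2 := pv_other_colon_imp x h1
      simp at h1 h2
      simp [h1, h2, ih]
    · by_cases h3 : (PySem.Str.startswith x "Other" || PySem.Str.startswith x "(Please indicate") = true
      · simp at h1 h3
        rcases h3 with h3 | h3 <;> simp [h1, h3, ih]
      · by_cases h4 : pvNegatives.contains (PySem.Str.strip ((PySem.List.pyGet? ((PySem.Str.split? x ": ").getD []) 1).getD "")) = true
        · simp at h1 h3 h4
          simp [h1, h3, h4, ih]
        · simp at h1 h3 h4
          simp [h1, h3, h4, ih]

-- ===== VERDICT (by name: the statement is the Claim_ definition above) =====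
theorem get_policy_checklist_item_spec : Claim_equal_get_policy_checklist_item := by
  intro prs phrases item _ _
  unfold Spec_get_policy_checklist_item get_policy_checklist_item get_policy_checklist_item_alt
  match prs with
  | none => rfl
  | some d =>
    simp only
    by_cases h0 : ((PySem.Str.split? ((d.lookup item).getD "") "\n").getD []).length = 0
    · have hnil : (PySem.Str.split? ((d.lookup item).getD "") "\n").getD [] = [] := List.length_eq_zero_iff.mp h0
      rw [if_pos h0]
      rw [hnil]
      simp
    · by_cases h01 : ((PySem.Str.split? ((d.lookup item).getD "") "\n").getD []).length = 1
      · rw [if_neg h0, if_pos h01, if_pos h01]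
      · rw [if_neg h0, if_neg h01, if_neg h01]
        rw [pv_fold_spec phrases _ [] []]
        simp
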